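-- pv_equiv track=rewrite | github.com/neutrino2211/owl-bundle | FQL.py | FUnassign2
-- ===== SOURCE A (Python) =====
-- def FUnassign2(iterable):
--     m = ""
--     for i in iterable:
--         if i == "e":
--             m+="aa"
--         elif i == "f":
--             m+="ab"
--         elif i == "g":
--             m+="ac"
--         elif i == "h":
--             m+="ad"
--         elif i == "i":
--             m+="ba"
--         elif i == "j":
--             m+="bb"
--         elif i == "k":
--             m+="bc"
--         elif i == "l":
--             m+="bd"
--         elif i == "m":
--             m+="ca"
--         elif i == "n":
--             m+="cb"
--         elif i == "o":
--             m+="cc"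
--         elif i == "p":
--             m+="cd"
--         elif i == "q":
--             m+="da"
--         elif i == "r":
--             m+="db"
--         elif i == "s":
--             m+="dc"
--         elif i == "t":
--             m+="dd"
--     return m
-- ===== SOURCE B (Python) =====
-- def FUnassign2(iterable):
--     out = []
--     for i in iterable:
--         if isinstance(i, str) and len(i) == 1 and 'e' <= i <= 't':
--             n = ord(i) - ord('e')
--             out.append("abcd"[n // 4] + "abcd"[n % 4])
--     return "".join(out)
-- ===== Notes on version B (the rewrite author's own statement) =====
-- stated objective: simpler
-- what changed: Replaces the 16-branch if/elif chain by arithmetic: a char in 'e'..'t' has index n = ord(i)-ord('e') in 0..15 and its code is that index written in base 4 over 'abcd', collected in a list and joined once.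
import Mathlib
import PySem

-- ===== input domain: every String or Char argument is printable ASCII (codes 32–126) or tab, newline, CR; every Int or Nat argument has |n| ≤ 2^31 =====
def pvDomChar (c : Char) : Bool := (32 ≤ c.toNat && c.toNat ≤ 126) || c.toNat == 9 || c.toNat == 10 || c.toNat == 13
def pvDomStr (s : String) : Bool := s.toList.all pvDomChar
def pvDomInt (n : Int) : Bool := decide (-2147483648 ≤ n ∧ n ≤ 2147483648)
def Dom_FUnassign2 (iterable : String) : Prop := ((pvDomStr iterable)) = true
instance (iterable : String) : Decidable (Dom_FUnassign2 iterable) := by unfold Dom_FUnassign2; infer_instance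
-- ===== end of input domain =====

-- B replaces A's 16-branch if/elif chain by arithmetic: chars 'e'..'t' are indices
-- 0..15 and the code is that index in base 4 over "abcd"; objective: simpler.


-- ===== PORT A =====
-- one loop step of A: the 16-way if/elif chain appending the hard-coded code
def FUnassign2_step (m : String) (i : Char) : String :=
  if i = 'e' then m ++ "aa"
  else if i = 'f' then m ++ "ab"
  else if i = 'g' then m ++ "ac"
  else if i = 'h' then m ++ "ad"
  else if i = 'i' then m ++ "ba"
  else if i = 'j' then m ++ "bb"
  else if i = 'k' then m ++ "bc"
  else if i = 'l' then m ++ "bd"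
  else if i = 'm' then m ++ "ca"
  else if i = 'n' then m ++ "cb"
  else if i = 'o' then m ++ "cc"
  else if i = 'p' then m ++ "cd"
  else if i = 'q' then m ++ "da"
  else if i = 'r' then m ++ "db"
  else if i = 's' then m ++ "dc"
  else if i = 't' then m ++ "dd"
  else m

def FUnassign2 (iterable : String) : String :=
  iterable.toList.foldl FUnassign2_step ""

-- ===== PORT B =====
-- per-char emission: 'e' <= i <= 't' on 1-char Python strings is code-point
-- comparison, ported as toNat bounds; "abcd"[k] is a list index (k is 0..3 here)
def FUnassign2_emit (i : Char) : List Char :=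
  if 101 ≤ i.toNat ∧ i.toNat ≤ 116 then
    let n := i.toNat - 101
    ["abcd".toList.getD (n / 4) 'a', "abcd".toList.getD (n % 4) 'a']
  else []

def FUnassign2_alt (iterable : String) : String :=
  String.ofList (iterable.toList.flatMap FUnassign2_emit)

-- ===== PRECONDITION & SPEC =====
def Spec_FUnassign2 (iterable : String) (out : String) : Prop := out = FUnassign2_alt iterable
instance (iterable : String) (out : String) : Decidable (Spec_FUnassign2 iterable out) := by unfold Spec_FUnassign2; infer_instance

-- ===== CLAIM (what is proved, stated in full; the proofs are below) =====
def Claim_equal_FUnassign2 : Prop := ∀ (iterable : String), Dom_FUnassign2 iterable → Spec_FUnassign2 iterable (FUnassign2 iterable)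

-- ===== LEMMAS AND PROOFS =====

theorem pv_char_toNat_ne {c d : Char} {n : Nat} (h : c ≠ d) (hd : d.toNat = n) :
    c.toNat ≠ n := fun he => h (Char.ext (UInt32.toNat_inj.mp (he.trans hd.symm)))

set_option maxHeartbeats 1600000 in
theorem FUnassign2_step_eq (m : String) (i : Char) :
    FUnassign2_step m i = m ++ String.ofList (FUnassign2_emit i) := by
  unfold FUnassign2_step
  by_cases h1 : i = 'e'
  · rw [if_pos h1]; subst h1; congr 1
  rw [if_neg h1]
  by_cases h2 : i = 'f'
  · rw [if_pos h2]; subst h2; congr 1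
  rw [if_neg h2]
  by_cases h3 : i = 'g'
  · rw [if_pos h3]; subst h3; congr 1
  rw [if_neg h3]
  by_cases h4 : i = 'h'
  · rw [if_pos h4]; subst h4; congr 1
  rw [if_neg h4]
  by_cases h5 : i = 'i'
  · rw [if_pos h5]; subst h5; congr 1
  rw [if_neg h5]
  by_cases h6 : i = 'j'
  · rw [if_pos h6]; subst h6; congr 1
  rw [if_neg h6]
  by_cases h7 : i = 'k'
  · rw [if_pos h7]; subst h7; congr 1
  rw [if_neg h7]
  by_cases h8 : i = 'l'
  · rw [if_pos h8]; subst h8; congr 1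
  rw [if_neg h8]
  by_cases h9 : i = 'm'
  · rw [if_pos h9]; subst h9; congr 1
  rw [if_neg h9]
  by_cases h10 : i = 'n'
  · rw [if_pos h10]; subst h10; congr 1
  rw [if_neg h10]
  by_cases h11 : i = 'o'
  · rw [if_pos h11]; subst h11; congr 1
  rw [if_neg h11]
  by_cases h12 : i = 'p'
  · rw [if_pos h12]; subst h12; congr 1
  rw [if_neg h12]
  by_cases h13 : i = 'q'
  · rw [if_pos h13]; subst h13; congr 1
  rw [if_neg h13]
  by_cases h14 : i = 'r'
  · rw [if_pos h14]; subst h14; congr 1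
  rw [if_neg h14]
  by_cases h15 : i = 's'
  · rw [if_pos h15]; subst h15; congr 1
  rw [if_neg h15]
  by_cases h16 : i = 't'
  · rw [if_pos h16]; subst h16; congr 1
  rw [if_neg h16]
  have e1 : i.toNat ≠ 101 := pv_char_toNat_ne h1 rfl
  have e2 : i.toNat ≠ 102 := pv_char_toNat_ne h2 rfl
  have e3 : i.toNat ≠ 103 := pv_char_toNat_ne h3 rfl
  have e4 : i.toNat ≠ 104 := pv_char_toNat_ne h4 rfl
  have e5 : i.toNat ≠ 105 := pv_char_toNat_ne h5 rfl
  have e6 : i.toNat ≠ 106 := pv_char_toNat_ne h6 rfl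
  have e7 : i.toNat ≠ 107 := pv_char_toNat_ne h7 rfl
  have e8 : i.toNat ≠ 108 := pv_char_toNat_ne h8 rfl
  have e9 : i.toNat ≠ 109 := pv_char_toNat_ne h9 rfl
  have e10 : i.toNat ≠ 110 := pv_char_toNat_ne h10 rfl
  have e11 : i.toNat ≠ 111 := pv_char_toNat_ne h11 rfl
  have e12 : i.toNat ≠ 112 := pv_char_toNat_ne h12 rfl
  have e13 : i.toNat ≠ 113 := pv_char_toNat_ne h13 rfl
  have e14 : i.toNat ≠ 114 := pv_char_toNat_ne h14 rfl
  have e15 : i.toNat ≠ 115 := pv_char_toNat_ne h15 rfl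
  have e16 : i.toNat ≠ 116 := pv_char_toNat_ne h16 rfl
  rw [FUnassign2_emit, if_neg (by omega), String.ofList_nil, String.append_empty]

theorem FUnassign2_foldl_eq (l : List Char) (s : String) :
    l.foldl FUnassign2_step s = s ++ String.ofList (l.flatMap FUnassign2_emit) := by
  induction l generalizing s with
  | nil => rw [List.foldl_nil, List.flatMap_nil, String.ofList_nil, String.append_empty]
  | cons c t ih =>
      rw [List.foldl_cons, FUnassign2_step_eq, ih, List.flatMap_cons,
        String.ofList_append, String.append_assoc]

-- ===== VERDICT (by name: the statement is the Claim_ definition above) =====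
theorem FUnassign2_spec : Claim_equal_FUnassign2 := by
  intro it _
  show FUnassign2 it = FUnassign2_alt it
  unfold FUnassign2 FUnassign2_alt
  rw [FUnassign2_foldl_eq, String.empty_append]
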